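-- pv_equiv track=rewrite | github.com/rorik/UBU-Algoritmia | p6/solution.py | divide_y_venceras_iterativo
-- ===== SOURCE A (Python) =====
-- import math
--
-- def divide_y_venceras_iterativo(inferior, superior=None, divisiones=2):
--     """
--     Genera los mismos valores que divide_y_venceras_recursivo, pero sin usar
--     recursión.
--     """
--
--     if superior is None:
--         superior = inferior
--         inferior = 0
--
--     resultado = []
--     queue = [(inferior, superior)]
--     while len(queue) > 0:
--         inferior, superior = queue.pop(0)
--         resultado.append((inferior, superior))
--         if inferior != superior:
--             diff = superior - inferior + 1
--             if diff <= divisiones: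
--                 for i in range(diff):
--                     inf = inferior + i
--                     resultado.append((inf, inf))
--             else:
--                 gap = math.floor(diff / divisiones)
--                 remainder = diff - gap * divisiones
--                 next_inf = inferior
--                 queued = []
--                 for i in range(divisiones):
--                     inf = next_inf
--                     sup = inf + gap - 1
--                     if remainder > 0:
--                         sup += 1
--                         remainder -= 1
--                     next_inf = sup + 1
--                     queued.append((inf, sup))
--                 queue = queued + queue
--
--     return resultado
-- ===== SOURCE B (Python) =====
-- def divide_y_venceras_iterativo(inferior, superior=None, divisiones=2):
--     """Recursive re-implementation: pre-order expansion of the interval tree."""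
--     if superior is None:
--         inferior, superior = 0, inferior
--
--     def rec(inf, sup):
--         out = [(inf, sup)]
--         if inf != sup:
--             diff = sup - inf + 1
--             if diff <= divisiones:
--                 out.extend((inf + i, inf + i) for i in range(diff))
--             else:
--                 gap = diff // divisiones
--                 remainder = diff - gap * divisiones
--                 nxt = inf
--                 for _ in range(divisiones):
--                     lo = nxt
--                     hi = lo + gap - 1
--                     if remainder > 0:
--                         hi += 1
--                         remainder -= 1
--                     nxt = hi + 1
--                     out.extend(rec(lo, hi))
--         return out
--
--     return rec(inferior, superior)
-- ===== Notes on version B (the rewrite author's own statement) =====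
-- stated objective: simpler
-- what changed: Replaced A's explicit worklist loop (pop front, prepend the split's children to emulate pre-order) by a direct recursive pre-order expansion: a nested helper emits the interval and, unless it is a leaf or small enough for the singleton shortcut, recurses on each child in order.
import Mathlib
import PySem

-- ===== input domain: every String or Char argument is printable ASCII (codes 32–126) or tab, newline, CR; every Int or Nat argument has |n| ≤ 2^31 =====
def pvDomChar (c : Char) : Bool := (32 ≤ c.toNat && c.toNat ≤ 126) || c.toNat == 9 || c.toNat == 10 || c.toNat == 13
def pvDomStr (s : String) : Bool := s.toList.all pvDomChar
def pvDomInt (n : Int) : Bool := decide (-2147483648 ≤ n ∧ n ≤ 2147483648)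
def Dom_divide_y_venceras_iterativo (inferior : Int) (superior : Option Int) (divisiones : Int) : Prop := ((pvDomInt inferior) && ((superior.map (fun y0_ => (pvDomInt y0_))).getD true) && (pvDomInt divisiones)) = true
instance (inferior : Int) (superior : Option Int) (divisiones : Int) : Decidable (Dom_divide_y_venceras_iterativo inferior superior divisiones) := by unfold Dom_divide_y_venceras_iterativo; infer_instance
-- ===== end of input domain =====

-- B replaces A's explicit worklist loop by a direct recursive pre-order expansion (objective: simpler).

-- ===== PORT A =====
-- fuel bound for both loop ports: a totality guard only (always sufficient inside Pre_;
-- in Python A loops forever for divisiones = 1 on a non-trivial interval, excluded by Pre_)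
def pvSizeA (p : Int × Int) : Nat := (2 * (p.2 - p.1)).toNat + 1

-- the inner `for i in range(divisiones)` of A building `queued`; state = (remainder, next_inf, queued)
def pvStepA (gap : Int) (st : Int × Int × List (Int × Int)) (_i : Int) : Int × Int × List (Int × Int) :=
  let inf := st.2.1
  let sup := inf + gap - 1
  if st.1 > 0 then (st.1 - 1, (sup + 1) + 1, st.2.2 ++ [(inf, sup + 1)])
  else (st.1, sup + 1, st.2.2 ++ [(inf, sup)])

def pvLoopA (divisiones : Int) : Nat → List (Int × Int) → List (Int × Int) → List (Int × Int)
  | 0, _, resultado => resultado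
  | _ + 1, [], resultado => resultado
  | fuel + 1, (inferior, superior) :: queue, resultado =>
    let resultado := resultado ++ [(inferior, superior)]
    if inferior ≠ superior then
      let diff := superior - inferior + 1
      if diff ≤ divisiones then
        pvLoopA divisiones fuel queue
          (resultado ++ (PySem.List.pyRange 0 diff 1).map (fun i => (inferior + i, inferior + i)))
      else
        -- math.floor(diff / divisiones) is exact floor division for |values| ≤ 2^33 (float quotient exact enough)
        let gap := PySem.Int.floordiv diff divisiones
        let remainder := diff - gap * divisiones
        let queued := ((PySem.List.pyRange 0 divisiones 1).foldl (pvStepA gap) (remainder, inferior, [])).2.2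
        pvLoopA divisiones fuel (queued ++ queue) resultado
    else
      pvLoopA divisiones fuel queue resultado

def divide_y_venceras_iterativo (inferior : Int) (superior : Option Int) (divisiones : Int) : List (Int × Int) :=
  let p : Int × Int := match superior with
    | none => (0, inferior)
    | some s => (inferior, s)
  pvLoopA divisiones (pvSizeA p) [p] []

-- ===== PORT B =====
-- recursive pre-order expansion (fuel is a totality guard only, always sufficient inside Pre_)
def pvRecB (divisiones : Int) : Nat → Int → Int → List (Int × Int)
  | 0, inf, sup => [(inf, sup)]
  | fuel + 1, inf, sup =>
    if inf ≠ sup then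
      let diff := sup - inf + 1
      if diff ≤ divisiones then
        (inf, sup) :: (PySem.List.pyRange 0 diff 1).map (fun i => (inf + i, inf + i))
      else
        let gap := PySem.Int.floordiv diff divisiones
        let remainder := diff - gap * divisiones
        ((PySem.List.pyRange 0 divisiones 1).foldl
          (fun st _i =>
            let lo := st.2.1
            let hi := lo + gap - 1
            if st.1 > 0 then (st.1 - 1, (hi + 1) + 1, st.2.2 ++ pvRecB divisiones fuel lo (hi + 1))
            else (st.1, hi + 1, st.2.2 ++ pvRecB divisiones fuel lo hi))
          (remainder, inf, [(inf, sup)])).2.2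
    else [(inf, sup)]

def divide_y_venceras_iterativo_alt (inferior : Int) (superior : Option Int) (divisiones : Int) : List (Int × Int) :=
  let p : Int × Int := match superior with
    | none => (0, inferior)
    | some s => (inferior, s)
  pvRecB divisiones (pvSizeA p) p.1 p.2

-- ===== PRECONDITION & SPEC =====
-- Pre_ excludes exactly divisiones ∈ {0, 1} combined with a non-trivial effective interval:
-- there A raises ZeroDivisionError (divisiones = 0) or loops forever (divisiones = 1).
def Pre_divide_y_venceras_iterativo (inferior : Int) (superior : Option Int) (divisiones : Int) : Prop :=
  let p : Int × Int := match superior with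
    | none => ((0 : Int), inferior)
    | some s => (inferior, s)
  p.2 ≤ p.1 ∨ (divisiones ≠ 0 ∧ divisiones ≠ 1)

instance (inferior : Int) (superior : Option Int) (divisiones : Int) : Decidable (Pre_divide_y_venceras_iterativo inferior superior divisiones) := by
  unfold Pre_divide_y_venceras_iterativo; infer_instance

def pvWitness_divide_y_venceras_iterativo : Int × Option Int × Int := (1, some 12, 3)

def Spec_divide_y_venceras_iterativo (inferior : Int) (superior : Option Int) (divisiones : Int) (out : List (Int × Int)) : Prop := out = divide_y_venceras_iterativo_alt inferior superior divisiones
instance (inferior : Int) (superior : Option Int) (divisiones : Int) (out : List (Int × Int)) : Decidable (Spec_divide_y_venceras_iterativo inferior superior divisiones out) := by unfold Spec_divide_y_venceras_iterativo; infer_instance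

-- ===== CLAIM =====
def Claim_equal_divide_y_venceras_iterativo : Prop := ∀ (inferior : Int) (superior : Option Int) (divisiones : Int), Dom_divide_y_venceras_iterativo inferior superior divisiones → Pre_divide_y_venceras_iterativo inferior superior divisiones → Spec_divide_y_venceras_iterativo inferior superior divisiones (divide_y_venceras_iterativo inferior superior divisiones)

-- ===== LEMMAS AND PROOFS =====

def pvMeasure (q : List (Int × Int)) : Nat := (q.map pvSizeA).sum
def pvKids (gap : Int) : Nat → Int → Int → List (Int × Int)
  | 0, _, _ => []
  | k + 1, rem, nxt =>
    if rem > 0 then (nxt, nxt + gap) :: pvKids gap k (rem - 1) (nxt + gap + 1)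
    else (nxt, nxt + gap - 1) :: pvKids gap k rem (nxt + gap)

theorem pvFoldB_eq_kids (d : Int) (f : Nat) (gap : Int) : ∀ (l : List Int) (rem nxt : Int) (acc : List (Int × Int)),
    (l.foldl
      (fun st (_i : Int) =>
        let lo := st.2.1
        let hi := lo + gap - 1
        if st.1 > 0 then (st.1 - 1, (hi + 1) + 1, st.2.2 ++ pvRecB d f lo (hi + 1))
        else (st.1, hi + 1, st.2.2 ++ pvRecB d f lo hi))
      (rem, nxt, acc)).2.2
      = acc ++ (pvKids gap l.length rem nxt).flatMap (fun p => pvRecB d f p.1 p.2) := by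
  intro l
  induction l with
  | nil => intro rem nxt acc; simp [pvKids]
  | cons x l ih =>
    intro rem nxt acc
    by_cases h : rem > 0
    · simp only [List.foldl_cons, List.length_cons, pvKids, if_pos h, ih]
      have e : nxt + gap - 1 + 1 = nxt + gap := by ring
      rw [e]; simp
    · simp only [List.foldl_cons, List.length_cons, pvKids, if_neg h, ih]
      simp

theorem pvKids_spec (gap : Int) : ∀ (k : Nat) (rem nxt : Int), 0 ≤ rem → 1 ≤ gap →
    (∀ p ∈ pvKids gap k rem nxt, p.1 ≤ p.2 ∧ p.2 - p.1 + 1 ≤ gap + min rem 1) ∧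
    ((pvMeasure (pvKids gap k rem nxt) : Int) + k = 2 * (k * gap + min rem k)) := by
  intro k
  induction k with
  | zero => intro rem nxt h0 h1; refine ⟨by simp [pvKids], ?_⟩; simp [pvKids, pvMeasure]; omega
  | succ k ih =>
    intro rem nxt h0 h1
    by_cases h : rem > 0
    · obtain ⟨ihm, ihs⟩ := ih (rem - 1) (nxt + gap + 1) (by omega) h1
      rw [pvKids, if_pos h]
      constructor
      · intro p hp
        rcases List.mem_cons.1 hp with hp | hp
        · subst hp; constructor <;> simp <;> omega
        · have := ihm p hp; omega
      · simp only [pvMeasure, List.map_cons, List.sum_cons] at ihs ⊢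
        have hsz : (pvSizeA (nxt, nxt + gap) : Int) = 2 * gap + 1 := by
          simp [pvSizeA]; omega
        push_cast at ihs ⊢
        rw [hsz]
        have hmin : min rem ((k : Int) + 1) = min (rem - 1) (k : Int) + 1 := by omega
        rw [hmin]
        ring_nf at ihs ⊢
        linarith [ihs]
    · obtain ⟨ihm, ihs⟩ := ih rem (nxt + gap) h0 h1
      rw [pvKids, if_neg h]
      have hrem : rem = 0 := by omega
      subst hrem
      constructor
      · intro p hp
        rcases List.mem_cons.1 hp with hp | hp
        · subst hp; constructor <;> simp <;> omega
        · exact ihm p hp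
      · simp only [pvMeasure, List.map_cons, List.sum_cons] at ihs ⊢
        have hsz : (pvSizeA (nxt, nxt + gap - 1) : Int) = 2 * gap - 1 := by
          simp [pvSizeA]; omega
        push_cast at ihs ⊢
        rw [hsz]
        have hmin0 : min (0 : Int) ((k : Int) + 1) = 0 := by omega
        have hmin0' : min (0 : Int) ((k : Int)) = 0 := by omega
        rw [hmin0]
        rw [hmin0'] at ihs
        ring_nf at ihs ⊢
        linarith [ihs]

theorem pvSplit_facts (d diff : Int) (hd : 2 ≤ d) (hdiff : d < diff) :
    1 ≤ PySem.Int.floordiv diff d ∧ 0 ≤ diff - PySem.Int.floordiv diff d * d ∧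
    diff - PySem.Int.floordiv diff d * d < d ∧ 2 * PySem.Int.floordiv diff d ≤ PySem.Int.floordiv diff d * d := by
  have hb : (0:Int) < d := by omega
  have h1 : 1 ≤ PySem.Int.floordiv diff d := by
    rw [PySem.Int.le_floordiv_iff_mul_le hb]; omega
  have h2 : PySem.Int.floordiv diff d * d ≤ diff := by
    rw [← PySem.Int.le_floordiv_iff_mul_le hb]
  have h3 : diff < (PySem.Int.floordiv diff d + 1) * d := by
    rw [← PySem.Int.floordiv_lt_iff_lt_mul hb]; omega
  refine ⟨h1, by omega, by nlinarith, by nlinarith⟩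

theorem pvFlatMap_congr {α β : Type} (l : List α) (f g : α → List β)
    (h : ∀ x ∈ l, f x = g x) : l.flatMap f = l.flatMap g := by
  induction l with
  | nil => rfl
  | cons x l ih =>
    simp only [List.flatMap_cons, h x (List.mem_cons_self), ih (fun y hy => h y (List.mem_cons_of_mem x hy))]

-- per-child size bound at a split with 2 ≤ d < diff
theorem pvKid_size (d diff : Int) (hd : 2 ≤ d) (hdiff : d < diff) (k : Nat) (nxt : Int) :
    ∀ p ∈ pvKids (PySem.Int.floordiv diff d) k (diff - PySem.Int.floordiv diff d * d) nxt,
      p.1 ≤ p.2 ∧ (pvSizeA p : Int) ≤ 2 * diff - 3 := by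
  obtain ⟨hg1, hr0, hrd, hgg⟩ := pvSplit_facts d diff hd hdiff
  intro p hp
  obtain ⟨hm, _⟩ := pvKids_spec (PySem.Int.floordiv diff d) k (diff - PySem.Int.floordiv diff d * d) nxt hr0 hg1
  obtain ⟨hle, hsz⟩ := hm p hp
  refine ⟨hle, ?_⟩
  have : (pvSizeA p : Int) = 2 * (p.2 - p.1) + 1 := by simp [pvSizeA]; omega
  rw [this]
  by_cases hr : 0 < diff - PySem.Int.floordiv diff d * d
  · have : min (diff - PySem.Int.floordiv diff d * d) 1 = 1 := by omega
    rw [this] at hsz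
    omega
  · have : min (diff - PySem.Int.floordiv diff d * d) 1 = diff - PySem.Int.floordiv diff d * d := by omega
    rw [this] at hsz
    omega

theorem pvRecB_fuel (d : Int) (hd : d ≠ 1) : ∀ (f : Nat) (l h : Int), pvSizeA (l, h) ≤ f →
    pvRecB d f l h = pvRecB d (pvSizeA (l, h)) l h := by
  intro f
  induction f using Nat.strong_induction_on with
  | _ f ih =>
    intro l h hf
    have hsz : pvSizeA (l, h) = (2 * (h - l)).toNat + 1 := rfl
    obtain ⟨f', rfl⟩ : ∃ f', f = f' + 1 := by
      rcases f with _ | f'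
      · exfalso; rw [hsz] at hf; omega
      · exact ⟨f', rfl⟩
    rw [hsz]
    by_cases hlh : l = h
    · simp [pvRecB, hlh]
    · by_cases hdl : h - l + 1 ≤ d
      · simp [pvRecB, hlh, hdl]
      · by_cases hd2 : 2 ≤ d
        · -- split branch with 2 ≤ d < diff
          have hdiff : d < h - l + 1 := by omega
          have hba : l + 2 ≤ h := by
            obtain ⟨hg1, hr0, hrd, _⟩ := pvSplit_facts d (h - l + 1) hd2 hdiff
            omega
          simp only [pvRecB, if_pos (by omega : l ≠ h), if_neg (by omega : ¬ (h - l + 1 ≤ d))]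
          rw [pvFoldB_eq_kids d f' (PySem.Int.floordiv (h - l + 1) d),
              pvFoldB_eq_kids d ((2 * (h - l)).toNat) (PySem.Int.floordiv (h - l + 1) d)]
          congr 1
          apply pvFlatMap_congr
          intro p hp
          obtain ⟨hple, hpsz⟩ := pvKid_size d (h - l + 1) hd2 hdiff _ _ p hp
          have hm : pvSizeA p ≤ (2 * (h - l)).toNat := by omega
          rw [ih f' (by omega) p.1 p.2 (by simpa using (by omega : pvSizeA p ≤ f')),
              ih ((2 * (h - l)).toNat) (by omega) p.1 p.2 (by simpa using hm)]
        · -- d ≤ 0: the children loop runs zero times on range(d)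
          have hnil : PySem.List.pyRange 0 d 1 = [] := PySem.List.pyRange_one_eq_nil (by omega)
          simp [pvRecB, hlh, hdl, hnil]

theorem pvFoldA_eq_kids (gap : Int) : ∀ (l : List Int) (rem nxt : Int) (acc : List (Int × Int)),
    (l.foldl (pvStepA gap) (rem, nxt, acc)).2.2 = acc ++ pvKids gap l.length rem nxt := by
  intro l
  induction l with
  | nil => intro rem nxt acc; simp [pvKids]
  | cons x l ih =>
    intro rem nxt acc
    by_cases h : rem > 0
    · simp only [List.foldl_cons, List.length_cons, pvStepA, pvKids, if_pos h, ih]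
      have e : nxt + gap - 1 + 1 = nxt + gap := by ring
      rw [e]; simp
    · simp only [List.foldl_cons, List.length_cons, pvStepA, pvKids, if_neg h, ih]
      simp

theorem pvLoopA_spec (d : Int) (hd : d ≠ 1) : ∀ (fuel : Nat) (queue res : List (Int × Int)),
    pvMeasure queue ≤ fuel →
    pvLoopA d fuel queue res = res ++ queue.flatMap (fun p => pvRecB d (pvSizeA p) p.1 p.2) := by
  intro fuel
  induction fuel using Nat.strong_induction_on with
  | _ fuel ih =>
    intro queue res hm
    rcases queue with _ | ⟨⟨a, b⟩, q⟩
    · rcases fuel with _ | f' <;> simp [pvLoopA]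
    · have hone : 1 ≤ pvSizeA (a, b) := Nat.le_add_left 1 _
      have hmc : pvMeasure ((a, b) :: q) = pvSizeA (a, b) + pvMeasure q := by
        simp [pvMeasure]
      obtain ⟨f', rfl⟩ : ∃ f', fuel = f' + 1 := by
        rcases fuel with _ | f'
        · exfalso; omega
        · exact ⟨f', rfl⟩
      by_cases hlh : a = b
      · subst hlh
        rw [pvLoopA]
        simp only [if_neg (by omega : ¬ a ≠ a)]
        rw [ih f' (by omega) q (res ++ [(a, a)]) (by omega)]
        have : pvRecB d (pvSizeA (a, a)) a a = [(a, a)] := by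
          simp [pvSizeA, pvRecB]
        simp [this]
      · by_cases hdl : b - a + 1 ≤ d
        · rw [pvLoopA]
          simp only [if_pos hlh, if_pos hdl]
          rw [ih f' (by omega) q _ (by omega)]
          have : pvRecB d (pvSizeA (a, b)) a b
              = (a, b) :: (PySem.List.pyRange 0 (b - a + 1) 1).map (fun i => (a + i, a + i)) := by
            rw [show pvSizeA (a, b) = (2 * (b - a)).toNat + 1 from rfl]
            simp [pvRecB, hlh, hdl]
          simp [this]
        · by_cases hd2 : 2 ≤ d
          · have hdiff : d < b - a + 1 := by omega
            obtain ⟨hg1, hr0, hrd, hgg⟩ := pvSplit_facts d (b - a + 1) hd2 hdiff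
            have hba : a + 2 ≤ b := by omega
            rw [pvLoopA]
            simp only [if_pos hlh, if_neg hdl]
            rw [pvFoldA_eq_kids, List.nil_append]
            have hlen : (PySem.List.pyRange 0 d 1).length = d.toNat := by
              rw [PySem.List.length_pyRange_one]; norm_num
            rw [hlen]
            -- measures
            have hK : (pvMeasure (pvKids (PySem.Int.floordiv (b - a + 1) d) d.toNat
                (b - a + 1 - PySem.Int.floordiv (b - a + 1) d * d) a) : Int) = 2 * (b - a + 1) - d := by
              have hspec := (pvKids_spec (PySem.Int.floordiv (b - a + 1) d) d.toNat
                (b - a + 1 - PySem.Int.floordiv (b - a + 1) d * d) a hr0 hg1).2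
              have hcast : ((d.toNat : Int)) = d := by omega
              rw [hcast] at hspec
              have hmin : min (b - a + 1 - PySem.Int.floordiv (b - a + 1) d * d) d
                  = b - a + 1 - PySem.Int.floordiv (b - a + 1) d * d := by omega
              rw [hmin] at hspec
              have hcomm : d * PySem.Int.floordiv (b - a + 1) d
                  = PySem.Int.floordiv (b - a + 1) d * d := mul_comm _ _
              linarith [hspec]
            have hsab : (pvSizeA (a, b) : Int) = 2 * (b - a + 1) - 1 := by
              simp [pvSizeA]; omega
            have hApp : pvMeasure (pvKids (PySem.Int.floordiv (b - a + 1) d) d.toNat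
                (b - a + 1 - PySem.Int.floordiv (b - a + 1) d * d) a ++ q)
                ≤ f' := by
              have : pvMeasure (pvKids (PySem.Int.floordiv (b - a + 1) d) d.toNat
                  (b - a + 1 - PySem.Int.floordiv (b - a + 1) d * d) a ++ q)
                  = pvMeasure (pvKids (PySem.Int.floordiv (b - a + 1) d) d.toNat
                    (b - a + 1 - PySem.Int.floordiv (b - a + 1) d * d) a) + pvMeasure q := by
                simp [pvMeasure]
              omega
            rw [ih f' (by omega) _ _ hApp]
            have hrecb : pvRecB d (pvSizeA (a, b)) a b
                = [(a, b)] ++ (pvKids (PySem.Int.floordiv (b - a + 1) d) d.toNat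
                    (b - a + 1 - PySem.Int.floordiv (b - a + 1) d * d) a).flatMap
                    (fun p => pvRecB d (pvSizeA p) p.1 p.2) := by
              rw [show pvSizeA (a, b) = (2 * (b - a)).toNat + 1 from rfl]
              simp only [pvRecB, if_pos hlh, if_neg hdl]
              rw [pvFoldB_eq_kids d ((2 * (b - a)).toNat) (PySem.Int.floordiv (b - a + 1) d), hlen]
              congr 1
              apply pvFlatMap_congr
              intro p hp
              obtain ⟨hple, hpsz⟩ := pvKid_size d (b - a + 1) hd2 hdiff _ _ p hp
              exact pvRecB_fuel d hd ((2 * (b - a)).toNat) p.1 p.2 (by simpa using (by omega : pvSizeA p ≤ (2 * (b - a)).toNat))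
            simp [hrecb]
          · have hnil : PySem.List.pyRange 0 d 1 = [] := PySem.List.pyRange_one_eq_nil (by omega)
            rw [pvLoopA]
            simp only [if_pos hlh, if_neg hdl, hnil]
            simp only [List.foldl_nil, List.nil_append]
            rw [ih f' (by omega) q _ (by omega)]
            have : pvRecB d (pvSizeA (a, b)) a b = [(a, b)] := by
              rw [show pvSizeA (a, b) = (2 * (b - a)).toNat + 1 from rfl]
              simp [pvRecB, hlh, hdl, hnil]
            simp [this]

theorem pvMain (d l h : Int) (hpre : h ≤ l ∨ (d ≠ 0 ∧ d ≠ 1)) :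
    pvLoopA d (pvSizeA (l, h)) [(l, h)] [] = pvRecB d (pvSizeA (l, h)) l h := by
  by_cases hd : d = 1
  · subst hd
    have hh : h ≤ l := by
      rcases hpre with hh | ⟨_, hne⟩
      · exact hh
      · exact absurd rfl hne
    by_cases hlh : l = h
    · subst hlh
      have hsz : pvSizeA (l, l) = 1 := by simp [pvSizeA]
      rw [hsz, pvLoopA, pvRecB]
      simp [pvLoopA]
    · have hlt : h < l := lt_of_le_of_ne hh fun e => hlh e.symm
      have hsz : pvSizeA (l, h) = 1 := by simp [pvSizeA]; omega
      have hnil : PySem.List.pyRange 0 (h - l + 1) 1 = [] :=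
        PySem.List.pyRange_one_eq_nil (by omega)
      rw [hsz, pvLoopA, pvRecB]
      simp [pvLoopA, hlh, hnil, show h - l + 1 ≤ (1 : Int) by omega]
  · have := pvLoopA_spec d hd (pvSizeA (l, h)) [(l, h)] [] (by simp [pvMeasure])
    simpa using this

-- ===== VERDICT =====
theorem divide_y_venceras_iterativo_spec : Claim_equal_divide_y_venceras_iterativo := by
  intro inferior superior divisiones _hdom hpre
  unfold Spec_divide_y_venceras_iterativo divide_y_venceras_iterativo divide_y_venceras_iterativo_alt
  unfold Pre_divide_y_venceras_iterativo at hpre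
  cases superior with
  | none => exact pvMain divisiones 0 inferior hpre
  | some s => exact pvMain divisiones inferior s hpre
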